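-- pv_equiv track=rewrite | github.com/acejacek/AdventOfCode | 2024/day05.py | createPages
-- ===== SOURCE A (Python) =====
-- def createPages(lines):
--     pages = []
--     ignore = True   # ignore everything until empty line
--
--     for line in lines:
--         if not ignore:
--             pages.append([int(s) for s in line.rstrip().split(",")])
--         if line == "\n":
--             ignore = False
--
--     return pages
-- ===== SOURCE B (Python) =====
-- def createPages(lines):
--     try:
--         i = lines.index("\n")
--     except ValueError:
--         return []
--     return [[int(s) for s in line.rstrip().split(",")] for line in lines[i + 1:]]
-- ===== Notes on version B (the rewrite author's own statement) =====
-- stated objective: idiomatic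
-- what changed: Replaces the boolean-flag single loop with a two-phase decomposition: locate the first blank line with list.index, then map the parse over the slice after it (no flag state, no per-line branching).
import Mathlib
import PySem

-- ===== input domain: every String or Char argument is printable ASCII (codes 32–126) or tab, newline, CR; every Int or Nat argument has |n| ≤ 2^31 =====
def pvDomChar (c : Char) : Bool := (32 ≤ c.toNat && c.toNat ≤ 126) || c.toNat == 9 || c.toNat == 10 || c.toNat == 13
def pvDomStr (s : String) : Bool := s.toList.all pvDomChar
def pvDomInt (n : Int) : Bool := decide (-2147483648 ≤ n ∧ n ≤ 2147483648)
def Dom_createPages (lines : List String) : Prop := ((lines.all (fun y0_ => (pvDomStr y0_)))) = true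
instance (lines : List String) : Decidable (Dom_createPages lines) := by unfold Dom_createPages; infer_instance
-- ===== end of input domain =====

-- B replaces A's boolean-flag loop by an index-then-slice decomposition (idiomatic, same cost).

-- [int(s) for s in line.rstrip().split(",")] — shared by both Pythons verbatim.
-- int(s) via PySem.Int.ofStr?; `.getD 0` is only reached outside Pre_ (where Python raises ValueError).
def pvParseLine (line : String) : List Int :=
  ((PySem.Str.split? (PySem.Str.rstrip line) ",").getD []).map (fun s => (PySem.Int.ofStr? s).getD 0)

-- ===== PORT A =====
-- state = (pages, ignore); append when not ignoring, then clear the flag on a "\n" line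
def pvStepA (st : List (List Int) × Bool) (line : String) : List (List Int) × Bool :=
  let st' := if st.2 then st else (st.1 ++ [pvParseLine line], st.2)
  if line = "\n" then (st'.1, false) else st'

def createPages (lines : List String) : List (List Int) :=
  (lines.foldl pvStepA ([], true)).1

-- ===== PORT B =====
-- lines.index("\n") then map the parse over lines[i+1:]
def createPages_alt (lines : List String) : List (List Int) :=
  match PySem.List.index? lines "\n" with
  | none => []
  | some i => (PySem.List.slice lines (some ((i : Int) + 1)) none).map pvParseLine

-- ===== PRECONDITION & SPEC =====
-- Pre_ excludes inputs where Python A (and B) raise ValueError: some line after the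
-- first "\n" line contains a comma-field that int() cannot parse.
def Pre_createPages (lines : List String) : Prop :=
  ∀ i ∈ (PySem.List.index? lines "\n").toList, ∀ line ∈ lines.drop (i + 1),
    ∀ s ∈ (PySem.Str.split? (PySem.Str.rstrip line) ",").getD [], (PySem.Int.ofStr? s).isSome = true
instance (lines : List String) : Decidable (Pre_createPages lines) := by
  unfold Pre_createPages; infer_instance

def pvWitness_createPages : List String := ["1|2\n", "\n", "3,4\n", "75\n"]

def Spec_createPages (lines : List String) (out : List (List Int)) : Prop := out = createPages_alt lines
instance (lines : List String) (out : List (List Int)) : Decidable (Spec_createPages lines out) := by unfold Spec_createPages; infer_instance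

-- ===== CLAIM (what is proved, stated in full; the proofs are below) =====
def Claim_equal_createPages : Prop := ∀ (lines : List String), Dom_createPages lines → Pre_createPages lines → Spec_createPages lines (createPages lines)

-- ===== LEMMAS AND PROOFS =====

-- once the flag is cleared, every remaining line is parsed and appended
theorem pvFoldA_false (rest : List String) (acc : List (List Int)) :
    (rest.foldl pvStepA (acc, false)).1 = acc ++ rest.map pvParseLine := by
  induction rest generalizing acc with
  | nil => simp
  | cons l ls ih =>
      by_cases h : l = "\n" <;> simp [pvStepA, h, ih]

-- while the flag is set, the result is governed by the first "\n" line
theorem pvFoldA_true (lines : List String) (acc : List (List Int)) :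
    (lines.foldl pvStepA (acc, true)).1 =
      acc ++ (match lines.idxOf? "\n" with
              | none => []
              | some i => (lines.drop (i + 1)).map pvParseLine) := by
  induction lines generalizing acc with
  | nil => simp
  | cons l ls ih =>
      by_cases h : l = "\n"
      · subst h
        simp only [List.foldl_cons, pvStepA, if_true]
        rw [pvFoldA_false]
        simp [List.idxOf?_cons]
      · simp only [List.foldl_cons, pvStepA, if_true, if_neg h]
        rw [ih]
        simp only [List.idxOf?_cons]
        cases hio : ls.idxOf? "\n" <;> simp [h]

theorem createPages_spec : Claim_equal_createPages := by
  intro lines _ _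
  unfold Spec_createPages createPages createPages_alt
  rw [pvFoldA_true]
  rw [PySem.List.index?_eq_idxOf?]
  cases h : lines.idxOf? "\n" with
  | none => simp
  | some i =>
      simp only [List.nil_append]
      have : ((i : Int) + 1) = ((i + 1 : Nat) : Int) := by push_cast; ring
      rw [this, PySem.List.slice_from_natCast]
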